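-- pv_equiv track=rewrite | github.com/Skyelabz210/MYSTIC | predictive_gauntlet_live.py | choose_primary
-- ===== SOURCE A (Python) =====
-- from typing import Dict, List, Any, Optional, Tuple
--
-- def choose_primary(
--     payload: Dict[str, List[int]],
--     hazard_type: str
-- ) -> Tuple[str, List[int]]:
--     hazard_type = (hazard_type or "").upper()
--
--     if hazard_type in ["FLASH_FLOOD", "HURRICANE"]:
--         for key in ["streamflow", "gage_height", "precipitation", "pressure"]:
--             if payload.get(key):
--                 return key, payload[key]
--     elif hazard_type == "FIRE_WEATHER":
--         for key in ["humidity", "wind_speed", "temperature", "pressure"]: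
--             if payload.get(key):
--                 return key, payload[key]
--     elif hazard_type in ["TORNADO", "SEVERE_STORM"]:
--         for key in ["pressure", "wind_speed", "precipitation"]:
--             if payload.get(key):
--                 return key, payload[key]
--     elif hazard_type == "STABLE":
--         for key in ["pressure", "streamflow", "temperature"]:
--             if payload.get(key):
--                 return key, payload[key]
--
--     for key in [
--         "streamflow",
--         "pressure",
--         "precipitation",
--         "humidity",
--         "wind_speed",
--         "temperature",
--         "gage_height",
--     ]:
--         if payload.get(key):
--             return key, payload[key]
--
--     return "UNKNOWN", []
-- ===== SOURCE B (Python) =====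
-- from typing import Dict, List, Tuple
--
-- _FLOOD = ["streamflow", "gage_height", "precipitation", "pressure"]
-- _STORM = ["pressure", "wind_speed", "precipitation"]
-- SPECIAL = {
--     "FLASH_FLOOD": _FLOOD,
--     "HURRICANE": _FLOOD,
--     "FIRE_WEATHER": ["humidity", "wind_speed", "temperature", "pressure"],
--     "TORNADO": _STORM,
--     "SEVERE_STORM": _STORM,
--     "STABLE": ["pressure", "streamflow", "temperature"],
-- }
-- FALLBACK = [
--     "streamflow",
--     "pressure",
--     "precipitation",
--     "humidity",
--     "wind_speed",
--     "temperature",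
--     "gage_height",
-- ]
--
-- def choose_primary(
--     payload: Dict[str, List[int]],
--     hazard_type: str
-- ) -> Tuple[str, List[int]]:
--     # Scan the payload once, keeping the truthy entry whose key sits earliest
--     # in the priority order; never probes the dict by key.
--     order = SPECIAL.get((hazard_type or "").upper(), []) + FALLBACK
--     best, best_i = ("UNKNOWN", []), len(order)
--     for k, v in payload.items():
--         if not v:
--             continue
--         try:
--             i = order.index(k)
--         except ValueError:
--             continue
--         if i < best_i:
--             best, best_i = (k, v), i
--     return best
-- ===== Notes on version B (the rewrite author's own statement) =====
-- stated objective: alternative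
-- what changed: A probes the dict key by key in hazard-specific priority order with an if/elif branch per hazard; B inverts the traversal: it computes the priority order once and makes a single pass over the payload items, keeping the truthy entry whose key has the least index in that order.
import Mathlib
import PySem

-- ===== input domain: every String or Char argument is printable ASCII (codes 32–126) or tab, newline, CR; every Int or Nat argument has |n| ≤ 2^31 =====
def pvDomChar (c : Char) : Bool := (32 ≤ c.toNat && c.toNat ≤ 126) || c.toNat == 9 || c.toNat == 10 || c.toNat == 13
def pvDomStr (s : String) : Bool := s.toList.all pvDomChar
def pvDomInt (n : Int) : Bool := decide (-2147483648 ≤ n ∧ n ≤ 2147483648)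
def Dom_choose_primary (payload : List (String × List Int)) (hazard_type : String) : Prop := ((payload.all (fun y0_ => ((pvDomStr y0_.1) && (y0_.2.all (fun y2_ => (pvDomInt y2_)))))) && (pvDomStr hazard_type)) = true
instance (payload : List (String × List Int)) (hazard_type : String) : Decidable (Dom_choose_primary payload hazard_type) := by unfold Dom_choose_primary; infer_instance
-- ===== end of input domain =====

-- B inverts A's traversal: instead of probing the dict key by key in priority order,
-- it scans the payload items once, keeping the truthy entry whose key sits earliest
-- in the priority order; objective: alternative (same cost, different algorithm).

-- ===== PORT A =====
-- payload.get(key) with default [] (first-match lookup in the insertion-order assoc list)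
def pvGet (payload : List (String × List Int)) (k : String) : List Int :=
  ((payload.find? (fun p => p.1 == k)).map (fun p => p.2)).getD []

-- the body of each 'for key in keys: if payload.get(key): return key, payload[key]' loop of A
def pvTryKeysA (payload : List (String × List Int)) : List String → Option (String × List Int)
  | [] => none
  | k :: ks =>
    let v := pvGet payload k
    if v ≠ [] then some (k, v) else pvTryKeysA payload ks

def choose_primary (payload : List (String × List Int)) (hazard_type : String) : String × List Int :=
  let h := PySem.Str.upper hazard_type
  let branch : Option (String × List Int) :=
    if h = "FLASH_FLOOD" ∨ h = "HURRICANE" then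
      pvTryKeysA payload ["streamflow", "gage_height", "precipitation", "pressure"]
    else if h = "FIRE_WEATHER" then
      pvTryKeysA payload ["humidity", "wind_speed", "temperature", "pressure"]
    else if h = "TORNADO" ∨ h = "SEVERE_STORM" then
      pvTryKeysA payload ["pressure", "wind_speed", "precipitation"]
    else if h = "STABLE" then
      pvTryKeysA payload ["pressure", "streamflow", "temperature"]
    else none
  match branch with
  | some r => r
  | none =>
    match pvTryKeysA payload ["streamflow", "pressure", "precipitation", "humidity",
                              "wind_speed", "temperature", "gage_height"] with
    | some r => r
    | none => ("UNKNOWN", [])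

-- ===== PORT B =====
def pvSPECIAL : PySem.Dict String (List String) :=
  PySem.Dict.ofList
    [ ("FLASH_FLOOD", ["streamflow", "gage_height", "precipitation", "pressure"]),
      ("HURRICANE", ["streamflow", "gage_height", "precipitation", "pressure"]),
      ("FIRE_WEATHER", ["humidity", "wind_speed", "temperature", "pressure"]),
      ("TORNADO", ["pressure", "wind_speed", "precipitation"]),
      ("SEVERE_STORM", ["pressure", "wind_speed", "precipitation"]),
      ("STABLE", ["pressure", "streamflow", "temperature"]) ]

def pvFALLBACK : List String :=
  ["streamflow", "pressure", "precipitation", "humidity",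
   "wind_speed", "temperature", "gage_height"]

-- B's loop over payload.items(): keep the truthy item whose key has the least index in order
def pvScanMin (order : List String) (best : String × List Int) (besti : Nat) :
    List (String × List Int) → String × List Int
  | [] => best
  | (k, v) :: rest =>
    if v = [] then pvScanMin order best besti rest
    else
      match PySem.List.index? order k with
      | none => pvScanMin order best besti rest
      | some i => if i < besti then pvScanMin order (k, v) i rest
                  else pvScanMin order best besti rest

def choose_primary_alt (payload : List (String × List Int)) (hazard_type : String) : String × List Int :=
  let order := PySem.Dict.getD pvSPECIAL (PySem.Str.upper hazard_type) [] ++ pvFALLBACK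
  pvScanMin order ("UNKNOWN", []) order.length payload

-- ===== PRECONDITION & SPEC =====
-- Pre_ excludes association lists with duplicate keys: a Python dict never has them,
-- so such lists do not represent any input the Python programs can receive.
def Pre_choose_primary (payload : List (String × List Int)) (hazard_type : String) : Prop :=
  (payload.map Prod.fst).Nodup
instance (payload : List (String × List Int)) (hazard_type : String) : Decidable (Pre_choose_primary payload hazard_type) := by unfold Pre_choose_primary; infer_instance
def pvWitness_choose_primary : (List (String × List Int)) × String :=
  ([("wind_speed", [3]), ("pressure", [1, 2])], "TORNADO")

def Spec_choose_primary (payload : List (String × List Int)) (hazard_type : String) (out : String × List Int) : Prop := out = choose_primary_alt payload hazard_type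
instance (payload : List (String × List Int)) (hazard_type : String) (out : String × List Int) : Decidable (Spec_choose_primary payload hazard_type out) := by unfold Spec_choose_primary; infer_instance

-- ===== CLAIM (what is proved, stated in full; the proofs are below) =====
def Claim_equal_choose_primary : Prop := ∀ (payload : List (String × List Int)) (hazard_type : String), Dom_choose_primary payload hazard_type → Pre_choose_primary payload hazard_type → Spec_choose_primary payload hazard_type (choose_primary payload hazard_type)

-- ===== LEMMAS AND PROOFS =====

-- A's answer for a single key list, as a find? over that list
def pvPick (order : List String) (cap : Nat) (items : List (String × List Int)) :
    Option (String × List Int) :=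
  ((order.take cap).find? (fun k => !(pvGet items k).isEmpty)).map (fun k => (k, pvGet items k))

-- lookup on a cons cell
theorem pvGet_cons (a : String) (b : List Int) (t : List (String × List Int)) (q : String) :
    pvGet ((a, b) :: t) q = if a = q then b else pvGet t q := by
  simp only [pvGet, List.find?]
  by_cases h : a = q
  · simp [h]
  · have hb : (a == q) = false := by simp [h]
    simp [hb, h]

theorem pvGet_not_mem (t : List (String × List Int)) (q : String) (h : q ∉ t.map Prod.fst) :
    pvGet t q = [] := by
  have : t.find? (fun p => p.1 == q) = none := by
    rw [List.find?_eq_none]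
    intro p hp hbe
    exact h (List.mem_map.mpr ⟨p, hp, by simpa using hbe⟩)
  simp [pvGet, this]

-- find?-then-pair is determined by the values of the lookup on the list's elements
theorem pvPickList_congr (l : List String) (f g : String → List Int)
    (h : ∀ k ∈ l, f k = g k) :
    ((l.find? (fun k => !(f k).isEmpty)).map (fun k => (k, f k))) =
      ((l.find? (fun k => !(g k).isEmpty)).map (fun k => (k, g k))) := by
  induction l with
  | nil => rfl
  | cons a t ih =>
    have ha : f a = g a := h a (by simp)
    simp only [List.find?]
    rw [ha]
    by_cases hb : (!(g a).isEmpty) = true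
    · simp [hb, ha]
    · simp only [Bool.not_eq_true] at hb
      simp only [hb]
      exact ih (fun k hk => h k (by simp [hk]))

-- the A side: the sequential probe over l equals pvPick with full cap
theorem pvTryKeysA_eq_pick (payload : List (String × List Int)) (l : List String) :
    (match pvTryKeysA payload l with
     | some r => r
     | none => ("UNKNOWN", [])) = (pvPick l l.length payload).getD ("UNKNOWN", []) := by
  induction l with
  | nil => rfl
  | cons k ks ih =>
    simp only [pvTryKeysA, pvPick, List.take_length] at *
    by_cases hv : pvGet payload k ≠ []
    · have : (!(pvGet payload k).isEmpty) = true := by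
        simp [hv]
      simp [hv, List.find?, this]
    · rw [not_ne_iff] at hv
      have : (!(pvGet payload k).isEmpty) = false := by simp [hv]
      simp only [List.find?, this]
      simpa [hv] using ih

-- the B side: the min-rank scan equals pvPick, for duplicate-free payload keys
-- find? with the same lookup values finds the same key
theorem pvFind?_congr (l : List String) (f g : String → List Int)
    (h : ∀ k ∈ l, f k = g k) :
    (l.find? (fun k => !(f k).isEmpty)) = (l.find? (fun k => !(g k).isEmpty)) := by
  induction l with
  | nil => rfl
  | cons a t ih =>
    have ha : f a = g a := h a (by simp)
    simp only [List.find?, ha]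
    split
    · rfl
    · exact ih (fun k hk => h k (by simp [hk]))

-- the B side: the min-rank scan equals pvPick, for duplicate-free payload keys
theorem pvScanMin_eq_pick (order : List String) :
    ∀ (items : List (String × List Int)) (best : String × List Int) (cap : Nat),
      (items.map Prod.fst).Nodup →
      pvScanMin order best cap items = (pvPick order cap items).getD best := by
  intro items
  induction items with
  | nil =>
    intro best cap _
    have : (order.take cap).find? (fun k => !(pvGet ([] : List (String × List Int)) k).isEmpty) = none := by
      rw [List.find?_eq_none]; intro x _; simp [pvGet]
    simp [pvScanMin, pvPick, this]
  | cons p rest ih =>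
    rcases p with ⟨k, v⟩
    intro best cap hnd
    have hnd' : (k :: rest.map Prod.fst).Nodup := by simpa using hnd
    have hk : k ∉ rest.map Prod.fst := (List.nodup_cons.mp hnd').1
    have hrest : (rest.map Prod.fst).Nodup := (List.nodup_cons.mp hnd').2
    have hval_ne : ∀ q, q ≠ k → pvGet ((k, v) :: rest) q = pvGet rest q := by
      intro q hq; rw [pvGet_cons]; simp [Ne.symm hq]
    have hval_self : pvGet ((k, v) :: rest) k = v := by rw [pvGet_cons]; simp
    by_cases hv : v = []
    · -- skipped item: its value is empty on both sides
      subst hv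
      have hcong : ∀ q ∈ order.take cap, pvGet ((k, ([] : List Int)) :: rest) q = pvGet rest q := by
        intro q _
        by_cases hq : q = k
        · subst hq; rw [hval_self, pvGet_not_mem rest q hk]
        · exact hval_ne q hq
      simp only [pvScanMin, if_true]
      rw [ih best cap hrest]
      unfold pvPick
      rw [pvPickList_congr _ _ _ hcong]
    · simp only [pvScanMin, hv, if_false]
      rcases hidx : PySem.List.index? order k with _ | i
      · -- key not in order: invisible to both sides
        have hno : k ∉ order := (PySem.List.index?_eq_none_iff order k).mp hidx
        have hcong : ∀ q ∈ order.take cap, pvGet ((k, v) :: rest) q = pvGet rest q := by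
          intro q hq
          exact hval_ne q (fun e => hno (e ▸ List.mem_of_mem_take hq))
        rw [ih best cap hrest]
        unfold pvPick
        rw [pvPickList_congr _ _ _ hcong]
      · rcases (PySem.List.index?_eq_some_iff order k i).mp hidx with ⟨pre, suf, horder, hlen, hpre⟩
        by_cases hlt : i < cap
        · -- selected: order.take cap = pre ++ k :: suf.take (cap - i - 1)
          simp only [hlt, if_true]
          rw [ih (k, v) i hrest]
          have htake : order.take cap = pre ++ k :: suf.take (cap - i - 1) := by
            subst horder
            rw [List.take_append, List.take_of_length_le (by omega)]
            congr 1
            have : cap - pre.length = (cap - i - 1) + 1 := by omega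
            rw [this, List.take_succ_cons]
          have htakei : order.take i = pre := by
            subst horder
            rw [List.take_append_of_le_length (by omega), List.take_of_length_le (by omega)]
          have hprecong : ∀ q ∈ pre, pvGet ((k, v) :: rest) q = pvGet rest q := by
            intro q hq
            exact hval_ne q (fun e => hpre (e ▸ hq))
          have hfk : (!(pvGet ((k, v) :: rest) k).isEmpty) = true := by
            rw [hval_self]; simpa using hv
          have hcons : (k :: suf.take (cap - i - 1)).find?
              (fun q => !(pvGet ((k, v) :: rest) q).isEmpty) = some k := by
            simp [List.find?, hfk]
          unfold pvPick
          rw [htake, htakei, List.find?_append, hcons,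
            pvFind?_congr pre _ _ hprecong]
          rcases hf : pre.find? (fun q => !(pvGet rest q).isEmpty) with _ | q
          · simp only [Option.none_or, Option.map_some, Option.map_none, Option.getD_none, Option.getD_some]
            rw [hval_self]
          · have hqpre : q ∈ pre := List.mem_of_find?_eq_some hf
            simp only [Option.some_or, Option.map_some, Option.getD_some]
            rw [hval_ne q (fun e => hpre (e ▸ hqpre))]
        · -- not better than the current best: k lies beyond the cap prefix
          simp only [hlt, if_false]
          have hno : k ∉ order.take cap := by
            subst horder
            rw [List.take_append_of_le_length (by omega)]
            exact fun hmem => hpre (List.mem_of_mem_take hmem)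
          have hcong : ∀ q ∈ order.take cap, pvGet ((k, v) :: rest) q = pvGet rest q := by
            intro q hq
            exact hval_ne q (fun e => hno (e ▸ hq))
          rw [ih best cap hrest]
          unfold pvPick
          rw [pvPickList_congr _ _ _ hcong]

theorem pvTryKeysA_append (payload : List (String × List Int)) (l1 l2 : List String) :
    pvTryKeysA payload (l1 ++ l2) = (pvTryKeysA payload l1).or (pvTryKeysA payload l2) := by
  induction l1 with
  | nil => simp [pvTryKeysA]
  | cons k ks ih =>
    simp only [List.cons_append, pvTryKeysA]
    split_ifs with hv
    · rfl
    · exact ih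

-- one branch of A (its key loop, then the fallback loop) equals B's scan over the combined order
theorem pvBridge (payload : List (String × List Int)) (l1 : List String)
    (hnd : (payload.map Prod.fst).Nodup) :
    (match pvTryKeysA payload l1 with
     | some r => r
     | none =>
       match pvTryKeysA payload ["streamflow", "pressure", "precipitation", "humidity",
                                 "wind_speed", "temperature", "gage_height"] with
       | some r => r
       | none => ("UNKNOWN", [])) =
    pvScanMin (l1 ++ pvFALLBACK) ("UNKNOWN", []) (l1 ++ pvFALLBACK).length payload := by
  rw [pvScanMin_eq_pick _ payload _ _ hnd,
    ← pvTryKeysA_eq_pick payload (l1 ++ pvFALLBACK), pvTryKeysA_append]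
  simp only [pvFALLBACK]
  cases pvTryKeysA payload l1 <;> simp [Option.or]

-- ===== VERDICT (by name: the statement is the Claim_ definition above) =====
theorem choose_primary_spec : Claim_equal_choose_primary := by
  intro payload hazard_type _ hpre
  unfold Spec_choose_primary choose_primary choose_primary_alt
  set h := PySem.Str.upper hazard_type with hh
  clear hh
  by_cases h1 : h = "FLASH_FLOOD" ∨ h = "HURRICANE"
  · have e : PySem.Dict.getD pvSPECIAL h [] =
        ["streamflow", "gage_height", "precipitation", "pressure"] := by
      rcases h1 with h1 | h1 <;> rw [h1] <;> rfl
    simp only [h1, if_true, e]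
    exact pvBridge payload _ hpre
  · by_cases h2 : h = "FIRE_WEATHER"
    · simp only [h2, if_true]
      exact pvBridge payload _ hpre
    · by_cases h3 : h = "TORNADO" ∨ h = "SEVERE_STORM"
      · have e : PySem.Dict.getD pvSPECIAL h [] =
            ["pressure", "wind_speed", "precipitation"] := by
          rcases h3 with h3 | h3 <;> rw [h3] <;> rfl
        simp only [h1, h2, h3, if_false, if_true, e]
        exact pvBridge payload _ hpre
      · by_cases h4 : h = "STABLE"
        · simp only [h4, if_true]
          exact pvBridge payload _ hpre
        · have h1a : h ≠ "FLASH_FLOOD" := (not_or.mp h1).1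
          have h1b : h ≠ "HURRICANE" := (not_or.mp h1).2
          have h3a : h ≠ "TORNADO" := (not_or.mp h3).1
          have h3b : h ≠ "SEVERE_STORM" := (not_or.mp h3).2
          have e : PySem.Dict.getD pvSPECIAL h [] = [] := by
            simp only [pvSPECIAL, PySem.Dict.ofList, PySem.Dict.update, List.foldl]
            rw [PySem.Dict.getD_insert, PySem.Dict.getD_insert, PySem.Dict.getD_insert,
              PySem.Dict.getD_insert, PySem.Dict.getD_insert, PySem.Dict.getD_insert,
              PySem.Dict.getD_empty]
            simp [h1a, h1b, h2, h3a, h3b, h4]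
          simp only [h1, h2, h3, h4, if_false, e]
          simpa [pvTryKeysA] using pvBridge payload [] hpre
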